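-- pv_equiv track=rewrite | github.com/GrinRus/ai_driven_dev | tools/tasklist_check.py | large_code_fence_without_report
-- ===== SOURCE A (Python) =====
-- from typing import Iterable, List, Optional
--
-- def large_code_fence_without_report(lines: List[str]) -> bool:
--     in_fence = False
--     fence_lines: List[int] = []
--     start_idx = 0
--     for idx, line in enumerate(lines):
--         if line.strip().startswith("```"):
--             if not in_fence:
--                 in_fence = True
--                 fence_lines = []
--                 start_idx = idx
--             else:
--                 in_fence = False
--                 if len(fence_lines) > 20 and not find_report_link_near(lines, start_idx):
--                     return True
--             continue
--         if in_fence: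
--             fence_lines.append(idx)
--     return False
--
-- def find_report_link_near(lines: List[str], idx: int, window: int = 5) -> bool:
--     start = max(0, idx - window)
--     end = min(len(lines), idx + window + 1)
--     for line in lines[start:end]:
--         if "aidd/reports/" in line:
--             return True
--     return False
-- ===== SOURCE B (Python) =====
-- from typing import List
--
-- def large_code_fence_without_report(lines: List[str]) -> bool:
--     markers = [i for i, line in enumerate(lines) if line.strip().startswith("```")]
--     for k in range(0, len(markers) - 1, 2):
--         open_idx, close_idx = markers[k], markers[k + 1]
--         if close_idx - open_idx - 1 > 20 and not find_report_link_near(lines, open_idx):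
--             return True
--     return False
--
-- def find_report_link_near(lines: List[str], idx: int, window: int = 5) -> bool:
--     start = max(0, idx - window)
--     end = min(len(lines), idx + window + 1)
--     for line in lines[start:end]:
--         if "aidd/reports/" in line:
--             return True
--     return False
-- ===== Notes on version B (the rewrite author's own statement) =====
-- stated objective: simpler
-- what changed: Replaces the stateful single-pass fence state machine (in_fence flag, accumulated fence_lines list, start index) with a two-phase decomposition: collect all fence-marker indices, then scan them in consecutive pairs using close-open-1 as the content length.
import Mathlib
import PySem

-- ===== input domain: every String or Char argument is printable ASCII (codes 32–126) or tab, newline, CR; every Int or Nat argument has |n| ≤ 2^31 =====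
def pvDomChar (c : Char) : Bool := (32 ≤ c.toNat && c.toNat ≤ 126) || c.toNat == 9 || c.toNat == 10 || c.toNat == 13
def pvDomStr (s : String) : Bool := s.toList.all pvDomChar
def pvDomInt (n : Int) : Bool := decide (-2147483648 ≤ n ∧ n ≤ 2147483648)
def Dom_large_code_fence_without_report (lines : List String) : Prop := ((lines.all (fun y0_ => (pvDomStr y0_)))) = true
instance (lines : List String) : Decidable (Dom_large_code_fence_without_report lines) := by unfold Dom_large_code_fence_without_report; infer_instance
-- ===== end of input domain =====

-- B replaces A's stateful single-pass fence state machine by a two-phase decomposition: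
-- collect all fence-marker indices, then scan them in consecutive pairs (objective: simpler).


-- ===== PORT A =====
-- line.strip().startswith("```")
def isFenceMarker (line : String) : Bool :=
  PySem.Str.startswith (PySem.Str.strip line) "```"

-- find_report_link_near(lines, idx, window=5); idx here is the (nonnegative) enumerate index,
-- so max(0, idx-5) is Nat subtraction and lines[start:end] is drop/take with natural bounds.
def find_report_link_near (lines : List String) (idx : Nat) : Bool :=
  let start := idx - 5
  let stop := min lines.length (idx + 5 + 1)
  ((lines.drop start).take (stop - start)).any (fun line => PySem.Str.isIn "aidd/reports/" line)

-- the enumerate loop of A, step for step (fence_lines kept as the list A maintains)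
def fenceLoopA (lines : List String) : List String → Nat → Bool → List Nat → Nat → Bool
  | [], _, _, _, _ => false
  | line :: rest, idx, in_fence, fence_lines, start_idx =>
    if isFenceMarker line then
      if !in_fence then
        fenceLoopA lines rest (idx + 1) true [] idx
      else
        if fence_lines.length > 20 && !find_report_link_near lines start_idx then true
        else fenceLoopA lines rest (idx + 1) false fence_lines start_idx
    else
      if in_fence then fenceLoopA lines rest (idx + 1) in_fence (fence_lines ++ [idx]) start_idx
      else fenceLoopA lines rest (idx + 1) in_fence fence_lines start_idx

def large_code_fence_without_report (lines : List String) : Bool :=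
  fenceLoopA lines lines 0 false [] 0

-- ===== PORT B =====
-- phase 1: the indices of all fence-marker lines
def markersFrom : List String → Nat → List Nat
  | [], _ => []
  | line :: rest, i =>
    if isFenceMarker line then i :: markersFrom rest (i + 1) else markersFrom rest (i + 1)

-- phase 2: scan consecutive (open, close) pairs; a trailing unpaired marker is dropped
def pairCheck (lines : List String) : List Nat → Bool
  | o :: c :: rest =>
    if (c - o - 1 > 20) && !find_report_link_near lines o then true else pairCheck lines rest
  | _ => false

def large_code_fence_without_report_alt (lines : List String) : Bool :=
  pairCheck lines (markersFrom lines 0)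

-- ===== PRECONDITION & SPEC =====
def Spec_large_code_fence_without_report (lines : List String) (out : Bool) : Prop := out = large_code_fence_without_report_alt lines
instance (lines : List String) (out : Bool) : Decidable (Spec_large_code_fence_without_report lines out) := by unfold Spec_large_code_fence_without_report; infer_instance

-- ===== CLAIM (what is proved, stated in full; the proofs are below) =====
def Claim_equal_large_code_fence_without_report : Prop := ∀ (lines : List String), Dom_large_code_fence_without_report lines → Spec_large_code_fence_without_report lines (large_code_fence_without_report lines)

-- ===== LEMMAS AND PROOFS =====

lemma le_of_mem_markersFrom {rest : List String} {i c : Nat}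
    (h : c ∈ markersFrom rest i) : i ≤ c := by
  induction rest generalizing i with
  | nil => simp [markersFrom] at h
  | cons l t ih =>
    simp only [markersFrom] at h
    split at h
    · rcases List.mem_cons.mp h with h | h
      · omega
      · have := ih h; omega
    · have := ih h; omega

lemma fenceLoopA_eq (lines : List String) (rest : List String) :
    ∀ (idx : Nat) (fence_lines : List Nat) (start_idx : Nat),
      (fenceLoopA lines rest idx false fence_lines start_idx
          = pairCheck lines (markersFrom rest idx)) ∧
      (fenceLoopA lines rest idx true fence_lines start_idx
          = match markersFrom rest idx with
            | [] => false
            | c :: ms =>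
              if (fence_lines.length + (c - idx) > 20) && !find_report_link_near lines start_idx
              then true else pairCheck lines ms) := by
  induction rest with
  | nil => intro idx fence start; simp [fenceLoopA, markersFrom, pairCheck]
  | cons line t ih =>
    intro idx fence start
    by_cases hm : isFenceMarker line
    · constructor
      · -- not in fence, marker opens
        have h2 := (ih (idx + 1) [] idx).2
        simp only [fenceLoopA, hm, if_true, Bool.not_false, markersFrom]
        rw [h2]
        cases hms : markersFrom t (idx + 1) with
        | nil => simp [pairCheck]
        | cons c ms =>
          have hc : idx + 1 ≤ c := le_of_mem_markersFrom (hms ▸ List.mem_cons_self)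
          simp only [pairCheck, List.length_nil]
          have e : c - idx - 1 = 0 + (c - (idx + 1)) := by omega
          rw [e]
          rfl
      · -- in fence, marker closes
        have h1 := (ih (idx + 1) fence start).1
        simp only [fenceLoopA, hm, markersFrom]
        rw [h1]
        simp
    · constructor
      · have h1 := (ih (idx + 1) fence start).1
        simp only [fenceLoopA, hm, markersFrom]
        simpa using h1
      · have h2 := (ih (idx + 1) (fence ++ [idx]) start).2
        simp only [fenceLoopA, hm, markersFrom]
        simp only [Bool.false_eq_true, if_false, ite_true]
        rw [h2]
        cases hms : markersFrom t (idx + 1) with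
        | nil => rfl
        | cons c ms =>
          have hc : idx + 1 ≤ c := le_of_mem_markersFrom (hms ▸ List.mem_cons_self)
          simp only [List.length_append, List.length_cons, List.length_nil]
          have e : fence.length + 1 + (c - (idx + 1)) = fence.length + (c - idx) := by omega
          rw [e]

-- ===== VERDICT (by name: the statement is the Claim_ definition above) =====
theorem large_code_fence_without_report_spec : Claim_equal_large_code_fence_without_report := by
  intro lines _
  unfold Spec_large_code_fence_without_report large_code_fence_without_report large_code_fence_without_report_alt
  exact (fenceLoopA_eq lines lines 0 [] 0).1
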